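-- pv_equiv track=rewrite | github.com/Toshan06/oosc | pipelines/video_analysis.py | classify_environment
-- ===== SOURCE A (Python) =====
-- def classify_environment(objects):
--     if any(obj in objects for obj in ["bed", "sofa", "tv", "refrigerator", "microwave"]):
--         return "Home"
--     elif any(obj in objects for obj in ["shelf", "bottle", "box", "refrigerator"]):
--         return "Shop"
--     elif any(obj in objects for obj in ["laptop", "keyboard", "chair", "desk"]):
--         return "Office"
--     else:
--         return "Unknown"
-- ===== SOURCE B (Python) =====
-- # Single pass over the objects, folding the minimum priority rank of any object seen,
-- # then mapping the final rank to its label.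
-- def _rank(x):
--     if x in ("bed", "sofa", "tv", "refrigerator", "microwave"):
--         return 0
--     if x in ("shelf", "bottle", "box"):
--         return 1
--     if x in ("laptop", "keyboard", "chair", "desk"):
--         return 2
--     return 3
--
-- def classify_environment(objects):
--     best = 3
--     for x in objects:
--         best = min(best, _rank(x))
--     return ("Home", "Shop", "Office", "Unknown")[best]
-- ===== Notes on version B (the rewrite author's own statement) =====
-- stated objective: alternative
-- what changed: Instead of A's staged if/elif scans of the objects list for each keyword group, B makes a single pass over the objects, folding a minimum priority rank obtained from one keyword-to-rank dictionary, and indexes a label table with the final rank.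
import Mathlib
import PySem

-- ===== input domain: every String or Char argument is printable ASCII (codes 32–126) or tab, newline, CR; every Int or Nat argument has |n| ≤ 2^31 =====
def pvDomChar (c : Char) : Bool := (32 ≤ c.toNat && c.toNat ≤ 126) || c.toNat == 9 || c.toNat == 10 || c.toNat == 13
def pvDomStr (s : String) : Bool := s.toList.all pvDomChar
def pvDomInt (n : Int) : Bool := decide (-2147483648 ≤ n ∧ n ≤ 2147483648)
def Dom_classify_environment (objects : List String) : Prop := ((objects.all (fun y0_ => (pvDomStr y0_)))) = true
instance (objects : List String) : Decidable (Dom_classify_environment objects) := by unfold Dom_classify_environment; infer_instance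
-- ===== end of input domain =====

-- B replaces A's staged keyword-group scans by a single pass over the objects folding a
-- minimum priority rank; same return value, no speed claim.

-- ===== PORT A =====
-- Literal port of A: if/elif chain of any(obj in objects) checks over each keyword group.
def classify_environment (objects : List String) : String :=
  if (["bed", "sofa", "tv", "refrigerator", "microwave"] : List String).any (fun obj => objects.contains obj) then "Home"
  else if (["shelf", "bottle", "box", "refrigerator"] : List String).any (fun obj => objects.contains obj) then "Shop"
  else if (["laptop", "keyboard", "chair", "desk"] : List String).any (fun obj => objects.contains obj) then "Office"
  else "Unknown"

-- ===== PORT B =====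
-- _rank from Source B: priority rank of one object (tuple membership tests, in order).
def pvRank (x : String) : Int :=
  if (["bed", "sofa", "tv", "refrigerator", "microwave"] : List String).contains x then 0
  else if (["shelf", "bottle", "box"] : List String).contains x then 1
  else if (["laptop", "keyboard", "chair", "desk"] : List String).contains x then 2
  else 3

-- Source B: best = 3; for x in objects: best = min(best, _rank(x)); return LABELS[best].
-- best is always in 0..3, so the tuple indexing LABELS[best] cannot raise; .getD "" is dead.
def classify_environment_alt (objects : List String) : String :=
  let best := objects.foldl (fun best x => min best (pvRank x)) 3
  (PySem.List.pyGet? (["Home", "Shop", "Office", "Unknown"] : List String) best).getD ""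

-- ===== PRECONDITION & SPEC =====
def Spec_classify_environment (objects : List String) (out : String) : Prop := out = classify_environment_alt objects
instance (objects : List String) (out : String) : Decidable (Spec_classify_environment objects out) := by unfold Spec_classify_environment; infer_instance

-- ===== CLAIM (what is proved, stated in full; the proofs are below) =====
def Claim_equal_classify_environment : Prop := ∀ (objects : List String), Dom_classify_environment objects → Spec_classify_environment objects (classify_environment objects)

-- ===== LEMMAS AND PROOFS =====

theorem rk0 (x : String) : pvRank x = 0 ↔ x ∈ (["bed","sofa","tv","refrigerator","microwave"] : List String) := by
  unfold pvRank; split_ifs <;> simp_all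

theorem rk1 (x : String) : pvRank x = 1 ↔ x ∈ (["shelf","bottle","box"] : List String) := by
  unfold pvRank; split_ifs with h0 h1 <;> simp_all
  rcases h0 with rfl|rfl|rfl|rfl|rfl <;> simp

theorem rk2 (x : String) : pvRank x = 2 ↔ x ∈ (["laptop","keyboard","chair","desk"] : List String) := by
  unfold pvRank; split_ifs with h0 h1 h2 <;> simp_all
  · rcases h0 with rfl|rfl|rfl|rfl|rfl <;> simp
  · rcases h1 with rfl|rfl|rfl <;> simp

theorem rk_cases (x : String) : pvRank x = 0 ∨ pvRank x = 1 ∨ pvRank x = 2 ∨ pvRank x = 3 := by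
  unfold pvRank; split_ifs <;> simp

theorem foldl_min_min (l : List String) (a b : Int) :
    l.foldl (fun b x => min b (pvRank x)) (min a b) = min a (l.foldl (fun b x => min b (pvRank x)) b) := by
  induction l generalizing a b with
  | nil => rfl
  | cons y l ih => simp only [List.foldl_cons, min_assoc]; exact ih a (min b (pvRank y))

theorem best_cons (x : String) (l : List String) :
    (x :: l).foldl (fun b x => min b (pvRank x)) 3 = min (pvRank x) (l.foldl (fun b x => min b (pvRank x)) 3) := by
  simp only [List.foldl_cons]
  rw [min_comm (3 : Int) (pvRank x)]
  exact foldl_min_min l (pvRank x) 3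

theorem best_eq (l : List String) :
    l.foldl (fun b x => min b (pvRank x)) 3 =
      (if l.any (fun x => pvRank x == 0) then 0
       else if l.any (fun x => pvRank x == 1) then 1
       else if l.any (fun x => pvRank x == 2) then (2 : Int) else 3) := by
  induction l with
  | nil => simp
  | cons x l ih =>
    rw [best_cons, ih]
    rcases rk_cases x with h|h|h|h <;> simp [List.any_cons, h] <;> split_ifs <;> omega

theorem a0_eq (objects : List String) :
    ((["bed", "sofa", "tv", "refrigerator", "microwave"] : List String).any (fun obj => objects.contains obj))
      = objects.any (fun x => pvRank x == 0) := by
  rw [Bool.eq_iff_iff]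
  simp only [List.any_eq_true, List.contains_eq_mem, decide_eq_true_eq, beq_iff_eq, rk0]
  constructor
  · rintro ⟨k, hk, ho⟩; exact ⟨k, ho, hk⟩
  · rintro ⟨k, ho, hk⟩; exact ⟨k, hk, ho⟩

theorem a1_eq (objects : List String) :
    ((["shelf", "bottle", "box", "refrigerator"] : List String).any (fun obj => objects.contains obj))
      = (objects.any (fun x => pvRank x == 1) || objects.contains "refrigerator") := by
  rw [Bool.eq_iff_iff]
  simp only [List.any_eq_true, List.contains_eq_mem, decide_eq_true_eq, beq_iff_eq, rk1,
    Bool.or_eq_true]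
  constructor
  · rintro ⟨k, hk, ho⟩
    simp only [List.mem_cons, List.not_mem_nil, or_false] at hk
    rcases hk with rfl|rfl|rfl|rfl
    · exact Or.inl ⟨_, ho, by simp⟩
    · exact Or.inl ⟨_, ho, by simp⟩
    · exact Or.inl ⟨_, ho, by simp⟩
    · exact Or.inr ho
  · rintro (⟨k, ho, hk⟩|hr)
    · refine ⟨k, ?_, ho⟩; simp only [List.mem_cons, List.not_mem_nil, or_false] at hk ⊢; tauto
    · exact ⟨"refrigerator", by simp, hr⟩

theorem a2_eq (objects : List String) :
    ((["laptop", "keyboard", "chair", "desk"] : List String).any (fun obj => objects.contains obj))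
      = objects.any (fun x => pvRank x == 2) := by
  rw [Bool.eq_iff_iff]
  simp only [List.any_eq_true, List.contains_eq_mem, decide_eq_true_eq, beq_iff_eq, rk2]
  constructor
  · rintro ⟨k, hk, ho⟩; exact ⟨k, ho, hk⟩
  · rintro ⟨k, ho, hk⟩; exact ⟨k, hk, ho⟩

theorem refr_c0 (objects : List String) (h : objects.contains "refrigerator" = true) :
    objects.any (fun x => pvRank x == 0) = true := by
  simp only [List.contains_eq_mem, decide_eq_true_eq] at h
  simp only [List.any_eq_true, beq_iff_eq]
  exact ⟨"refrigerator", h, by decide⟩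

-- ===== VERDICT (by name: the statement is the Claim_ definition above) =====
theorem classify_environment_spec : Claim_equal_classify_environment := by
  intro objects _
  unfold Spec_classify_environment classify_environment classify_environment_alt
  rw [a0_eq, a1_eq, a2_eq]
  simp only [best_eq]
  cases h0 : objects.any (fun x => pvRank x == 0) with
  | true => rfl
  | false =>
    cases hr : objects.contains "refrigerator" with
    | true => exact absurd (refr_c0 objects hr) (by simp [h0])
    | false =>
      cases h1 : objects.any (fun x => pvRank x == 1) with
      | true => rfl
      | false =>
        cases h2 : objects.any (fun x => pvRank x == 2) with
        | true => rfl
        | false => rfl
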